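-- pv_equiv track=rewrite | github.com/pagekite/upagekite | upagekite/web.py | parse_hdr
-- ===== SOURCE A (Python) =====
-- def parse_hdr(hdr):
--   # This parser is incorrect for foo="bar; baz"; type variables.
--   if ';' in hdr:
--     attrs = hdr.split(';')
--     hdr = attrs.pop(0)
--     attrs = dict(a.strip().split('=', 1) for a in attrs)
--     for a in attrs:
--       if attrs[a][:1] == attrs[a][-1:] == '"':
--         attrs[a] = attrs[a][1:-1]
--   else:
--     attrs = {}
--   return (hdr, attrs)
-- ===== SOURCE B (Python) =====
-- def parse_hdr(hdr):
--   i = hdr.find(';')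
--   if i < 0:
--     return (hdr, {})
--   head = hdr[:i]
--   attrs = {}
--   n = len(hdr)
--   i += 1
--   while i <= n:
--     j = hdr.find(';', i)
--     if j < 0:
--       j = n
--     k, _, v = hdr[i:j].strip().partition('=')
--     if v and v[0] == '"' and v[-1] == '"':
--       v = v[1:-1]
--     attrs[k] = v
--     i = j + 1
--   return (head, attrs)
-- ===== Notes on version B (the rewrite author's own statement) =====
-- stated objective: alternative
-- what changed: Replaces A's split-into-a-list-then-two-passes structure (split(';'), a dict comprehension of split('=',1) pairs, then a second loop over the finished dict stripping quotes) with a single streaming scan of the string itself: find(';', i) plus slicing walks the segments in place, and each segment is parsed with partition('=') and quote-stripped as it is met, so no intermediate segment list and no second pass over the dict exist.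
import Mathlib
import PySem

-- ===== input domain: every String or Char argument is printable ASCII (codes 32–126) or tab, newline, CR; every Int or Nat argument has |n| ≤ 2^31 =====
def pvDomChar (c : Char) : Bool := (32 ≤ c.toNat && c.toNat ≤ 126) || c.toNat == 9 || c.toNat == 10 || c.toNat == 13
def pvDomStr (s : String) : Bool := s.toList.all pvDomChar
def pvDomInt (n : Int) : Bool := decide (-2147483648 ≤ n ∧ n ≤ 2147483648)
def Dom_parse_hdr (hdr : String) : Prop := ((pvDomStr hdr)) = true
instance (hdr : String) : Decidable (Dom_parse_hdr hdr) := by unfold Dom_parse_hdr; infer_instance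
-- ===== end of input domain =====

-- B replaces A's split-into-a-list-then-two-passes-over-it structure (split(';'), dict
-- comprehension, then a second loop over the finished dict stripping quotes) by a single
-- streaming scan of the string itself: find(';', i)/slicing walks the segments in place and
-- each segment is parsed with partition('=') and its quotes stripped as it is met; same value.

-- ===== PORT A =====
-- the chained test attrs[a][:1] == attrs[a][-1:] == '"' and the strip attrs[a][1:-1]
def pvIsQuotedA (v : String) : Bool :=
  PySem.Str.slice v none (some 1) == PySem.Str.slice v (some (-1)) none &&
  PySem.Str.slice v (some (-1)) none == "\""

def pvUnquoteA (v : String) : String := PySem.Str.slice v (some 1) (some (-1))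

-- one element of the generator: a.strip().split('=', 1) fed to dict()
def pvStepA (d : PySem.Dict String String) (a : String) : PySem.Dict String String :=
  match PySem.Str.splitMax? (PySem.Str.strip a) "=" 1 with
  | some [k, v] => d.insert k v
  | _ => d                               -- Python's ValueError (1-element item), excluded by Pre_

def parse_hdr (hdr : String) : String × (List (String × String)) :=
  if PySem.Str.isIn ";" hdr then
    let attrs0 := (PySem.Str.split? hdr ";").getD []
    let hdr' := attrs0.headD ""          -- attrs.pop(0); attrs0 ≠ [] whenever ';' ∈ hdr
    let rest := attrs0.tail
    let d := rest.foldl pvStepA (PySem.Dict.empty)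
    -- for a in attrs: if attrs[a][:1] == attrs[a][-1:] == '"': attrs[a] = attrs[a][1:-1]
    let d2 := d.keys.foldl (fun d2 a =>
      if pvIsQuotedA (d2.getD a "") then d2.insert a (pvUnquoteA (d2.getD a "")) else d2) d
    (hdr', d2.items)
  else (hdr, [])

-- ===== PORT B =====
-- hand port of seg.partition('='): PySem has no partition; split at the FIRST '=' via find
-- (find returns the first index or -1), exact
def pvPartitionEq (s : List Char) : List Char × List Char :=
  let e := PySem.Chars.find s ['=']
  if e < 0 then (s, []) else (s.take e.toNat, s.drop (e.toNat + 1))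

-- the guarded test 'v and v[0] == '"' and v[-1] == '"'' (headD/getLastD exact: guarded nonempty)
def pvIsQuotedB (v : List Char) : Bool :=
  !v.isEmpty && (v.headD ' ' == '"') && (v.getLastD ' ' == '"')

-- the while loop; fuel bounds the trip count (i strictly increases each iteration and the
-- loop stops once i > len(hdr), so len(hdr)+2 iterations always suffice) — exact
def pvScanB (cs : List Char) : Nat → Nat → PySem.Dict String String → PySem.Dict String String
  | 0, _, d => d
  | fuel + 1, i, d =>
    if i ≤ cs.length then                                        -- while i <= n:
      let jI := PySem.Chars.findFrom cs [';'] (i : Int) none     -- j = hdr.find(';', i)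
      let j := if jI < 0 then cs.length else jI.toNat            -- if j < 0: j = n
      let seg := PySem.Chars.strip (PySem.Chars.slice cs (some (i : Int)) (some (j : Int)))
      let kv := pvPartitionEq seg                                -- k, _, v = ….partition('=')
      let v := if pvIsQuotedB kv.2 then PySem.Chars.slice kv.2 (some 1) (some (-1)) else kv.2
      pvScanB cs fuel (j + 1) (d.insert (String.ofList kv.1) (String.ofList v))
    else d

def parse_hdr_alt (hdr : String) : String × (List (String × String)) :=
  let cs := hdr.toList
  let i := PySem.Chars.find cs [';']                             -- i = hdr.find(';')
  if i < 0 then (hdr, [])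
  else
    let head := PySem.Chars.slice cs none (some i)               -- head = hdr[:i]
    let d := pvScanB cs (cs.length + 2) (i.toNat + 1) PySem.Dict.empty
    (String.ofList head, d.items)

-- ===== PRECONDITION & SPEC =====
-- Pre_ excludes exactly the inputs on which Python A raises ValueError: a ';' is present but
-- some later ';'-separated segment contains no '=' (dict() over a 1-element split).
def Pre_parse_hdr (hdr : String) : Prop :=
  PySem.Str.isIn ";" hdr = true →
    ∀ seg ∈ ((PySem.Str.split? hdr ";").getD []).tail, PySem.Str.isIn "=" seg = true
instance (hdr : String) : Decidable (Pre_parse_hdr hdr) := by unfold Pre_parse_hdr; infer_instance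
def pvWitness_parse_hdr : String := "text/html; charset=\"utf-8\"; q=0.9"

def Spec_parse_hdr (hdr : String) (out : String × (List (String × String))) : Prop := out = parse_hdr_alt hdr
instance (hdr : String) (out : String × (List (String × String))) : Decidable (Spec_parse_hdr hdr out) := by unfold Spec_parse_hdr; infer_instance

-- ===== CLAIM (what is proved, stated in full; the proofs are below) =====
def Claim_equal_parse_hdr : Prop := ∀ (hdr : String), Dom_parse_hdr hdr → Pre_parse_hdr hdr → Spec_parse_hdr hdr (parse_hdr hdr)

-- ===== LEMMAS AND PROOFS =====

-- ---- A-side normalisation: build-then-rescan = one fused fold (over the split pieces) ----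

def pvFix (v : String) : String := if pvIsQuotedA v then pvUnquoteA v else v

-- A's fold with the quote-fix fused in
def pvStepFused (d : PySem.Dict String String) (a : String) : PySem.Dict String String :=
  match PySem.Str.splitMax? (PySem.Str.strip a) "=" 1 with
  | some [k, v] => d.insert k (pvFix v)
  | _ => d

def pvMapVals (f : String → String) (d : PySem.Dict String String) : PySem.Dict String String :=
  PySem.Dict.mk (d.items.map (fun p => (p.1, f p.2)))

theorem pvMapVals_keys (f : String → String) (d : PySem.Dict String String) :
    (pvMapVals f d).keys = d.keys := by
  simp [pvMapVals, PySem.Dict.keys, List.map_map, Function.comp]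

theorem pvMapVals_insert (f : String → String) (d : PySem.Dict String String) (k v : String) :
    pvMapVals f (d.insert k v) = (pvMapVals f d).insert k (f v) := by
  apply PySem.Dict.ext
  have hc : (pvMapVals f d).contains k = d.contains k := by
    rw [PySem.Dict.contains_eq_decide_mem_keys, PySem.Dict.contains_eq_decide_mem_keys,
      pvMapVals_keys]
  by_cases h : d.contains k = true
  · rw [show ((pvMapVals f d).insert k (f v)).items
        = (pvMapVals f d).items.map (fun p => if p.1 == k then (k, f v) else p) from
        PySem.Dict.items_insert_of_contains _ _ (hc.trans h)]
    rw [show pvMapVals f (d.insert k v)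
        = PySem.Dict.mk ((d.insert k v).items.map (fun p => (p.1, f p.2))) from rfl]
    rw [PySem.Dict.items_insert_of_contains _ _ h]
    show (d.items.map _).map _ = _
    rw [show (pvMapVals f d).items = d.items.map (fun p => (p.1, f p.2)) from rfl]
    simp only [List.map_map]
    apply List.map_congr_left
    intro p _
    by_cases hk : p.1 == k
    · simp [Function.comp, hk]
    · simp [Function.comp, hk]
  · have h' : d.contains k = false := by simpa using h
    rw [show ((pvMapVals f d).insert k (f v)).items
        = (pvMapVals f d).items ++ [(k, f v)] from
        PySem.Dict.items_insert_of_not_contains _ _ (hc.trans h')]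
    rw [show pvMapVals f (d.insert k v)
        = PySem.Dict.mk ((d.insert k v).items.map (fun p => (p.1, f p.2))) from rfl]
    rw [PySem.Dict.items_insert_of_not_contains _ _ h']
    show ((d.items ++ [(k, v)]).map _) = _
    rw [show (pvMapVals f d).items = d.items.map (fun p => (p.1, f p.2)) from rfl]
    simp

-- one build step: pushing pvFix through A's step gives the fused step
theorem pvStep_rel (d : PySem.Dict String String) (a : String) :
    pvMapVals pvFix (pvStepA d a) = pvStepFused (pvMapVals pvFix d) a := by
  unfold pvStepA pvStepFused
  rcases _h : PySem.Str.splitMax? (PySem.Str.strip a) "=" 1 with _ | ⟨_ | ⟨k, _ | ⟨v, _ | _⟩⟩⟩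
  · rfl
  · rfl
  · rfl
  · exact pvMapVals_insert pvFix d k v
  · rfl

-- the build loops: mapping pvFix over A's dict gives the fused dict
theorem pvBuild_mapVals (l : List String) (d : PySem.Dict String String) :
    pvMapVals pvFix (l.foldl pvStepA d) = l.foldl pvStepFused (pvMapVals pvFix d) := by
  induction l generalizing d with
  | nil => rfl
  | cons a t ih => rw [List.foldl_cons, List.foldl_cons, ih, pvStep_rel]

-- A's keys stay duplicate-free through the build loop
theorem pvBuild_nodup (l : List String) (d : PySem.Dict String String) (h : d.keys.Nodup) :
    (l.foldl pvStepA d).keys.Nodup := by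
  induction l generalizing d with
  | nil => exact h
  | cons a t ih =>
    rw [List.foldl_cons]
    apply ih
    unfold pvStepA
    rcases _hs : PySem.Str.splitMax? (PySem.Str.strip a) "=" 1 with _ | ⟨_ | ⟨k, _ | ⟨v, _ | _⟩⟩⟩ <;>
      first | exact h | exact PySem.Dict.nodup_keys_insert _ _ _ h

-- A's second pass (mutate-while-iterating-keys) is exactly pvMapVals pvFix
theorem pvFixLoop (l : List String) (d : PySem.Dict String String)
    (hnd : d.keys.Nodup) (hl : l.Nodup) (hsub : ∀ a ∈ l, a ∈ d.keys) :
    l.foldl (fun d2 a =>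
      if pvIsQuotedA (d2.getD a "") then d2.insert a (pvUnquoteA (d2.getD a "")) else d2) d
    = PySem.Dict.mk (d.items.map (fun p => if p.1 ∈ l then (p.1, pvFix p.2) else p)) := by
  induction l generalizing d with
  | nil =>
    apply PySem.Dict.ext
    simp
  | cons a t ih =>
    have ha : a ∈ d.keys := hsub a (by simp)
    have hat : a ∉ t := (List.nodup_cons.mp hl).1
    have htnd : t.Nodup := (List.nodup_cons.mp hl).2
    have hstep : (if pvIsQuotedA (d.getD a "") then d.insert a (pvUnquoteA (d.getD a "")) else d)
        = PySem.Dict.mk (d.items.map (fun p => if p.1 = a then (p.1, pvFix p.2) else p)) := by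
      have hval : ∀ p ∈ d.items, p.1 = a → p.2 = d.getD a "" := by
        intro p hp hpa
        have hm : (a, p.2) ∈ d.items := by rw [← hpa]; simpa using hp
        exact (PySem.Dict.getD_of_mem_items d hm hnd "").symm
      by_cases hq : pvIsQuotedA (d.getD a "") = true
      · rw [if_pos hq]
        apply PySem.Dict.ext
        rw [PySem.Dict.items_insert_of_contains _ _
          ((PySem.Dict.contains_iff_mem_keys _ _).mpr ha)]
        show _ = (PySem.Dict.mk d.items).items.map _
        apply List.map_congr_left
        intro p hp
        by_cases hpa : p.1 = a
        · have hv := hval p hp hpa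
          simp [hpa, hv, pvFix, hq]
        · simp [hpa]
      · rw [if_neg hq]
        apply PySem.Dict.ext
        show (PySem.Dict.mk d.items).items = _
        have : d.items.map (fun p => if p.1 = a then (p.1, pvFix p.2) else p) = d.items := by
          apply List.map_congr_left (g := id) _ |>.trans (List.map_id _)
          intro p hp
          by_cases hpa : p.1 = a
          · have hv := hval p hp hpa
            have hfix : pvFix p.2 = p.2 := by unfold pvFix; rw [hv, if_neg hq]
            rw [if_pos hpa, hfix]
            rfl
          · simp [hpa]
        rw [this]
    set d1 := PySem.Dict.mk (d.items.map (fun p => if p.1 = a then (p.1, pvFix p.2) else p)) with hd1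
    have hkeys1 : d1.keys = d.keys := by
      simp only [hd1, PySem.Dict.keys, List.map_map]
      apply List.map_congr_left
      intro p _
      by_cases hpa : p.1 = a <;> simp [Function.comp, hpa]
    simp only [List.foldl_cons, hstep]
    rw [ih d1 (hkeys1 ▸ hnd) htnd (fun x hx => hkeys1 ▸ hsub x (by simp [hx]))]
    apply PySem.Dict.ext
    show (d1.items.map _) = (PySem.Dict.mk _).items
    show (d1.items.map _) = d.items.map _
    have hitems1 : d1.items = d.items.map (fun p => if p.1 = a then (p.1, pvFix p.2) else p) := rfl
    rw [hitems1, List.map_map]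
    apply List.map_congr_left
    intro p _
    by_cases hpa : p.1 = a
    · simp [Function.comp, hpa, hat]
    · by_cases hpt : p.1 ∈ t <;> simp [Function.comp, hpa, hpt]

-- the two A-side passes coincide with the single fused fold
theorem pvDict_eq (l : List String) :
    ((l.foldl pvStepA (PySem.Dict.empty)).keys.foldl (fun d2 a =>
        if pvIsQuotedA (d2.getD a "") then d2.insert a (pvUnquoteA (d2.getD a "")) else d2)
      (l.foldl pvStepA (PySem.Dict.empty)))
    = l.foldl pvStepFused (PySem.Dict.empty) := by
  set dA := l.foldl pvStepA (PySem.Dict.empty) with hdA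
  have hnd : dA.keys.Nodup := pvBuild_nodup l _ PySem.Dict.nodup_keys_empty
  rw [pvFixLoop dA.keys dA hnd hnd (fun _ h => h)]
  have hall : dA.items.map (fun p => if p.1 ∈ dA.keys then (p.1, pvFix p.2) else p)
      = dA.items.map (fun p => (p.1, pvFix p.2)) := by
    apply List.map_congr_left
    intro p hp
    have : p.1 ∈ dA.keys := List.mem_map_of_mem hp
    simp [this]
  rw [hall]
  show pvMapVals pvFix dA = _
  rw [hdA, pvBuild_mapVals]
  rfl

-- ---- characterising the split primitives ----

-- reference splitter: splitOn s [c] piece by piece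
def pvSegs (c : Char) (pre : List Char) : List Char → List (List Char)
  | [] => [pre]
  | a :: rest => if a = c then pre :: pvSegs c [] rest else pvSegs c (pre ++ [a]) rest

theorem pvSplitOnGo (c : Char) :
    ∀ (fuel : Nat) (l cur : List Char) (acc : List (List Char)), l.length < fuel →
    PySem.Chars.splitOn.go [c] fuel l cur acc = acc.reverse ++ pvSegs c cur.reverse l := by
  intro fuel
  induction fuel with
  | zero => intro l cur acc h; omega
  | succ fuel ih =>
    intro l cur acc h
    match l with
    | [] => rw [PySem.Chars.splitOn.go.eq_def]; simp [pvSegs]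
    | a :: rest =>
      have hstep : PySem.Chars.splitOn.go [c] (fuel + 1) (a :: rest) cur acc =
          if [c].isPrefixOf (a :: rest) = true then
            PySem.Chars.splitOn.go [c] fuel (List.drop [c].length (a :: rest)) [] (cur.reverse :: acc)
          else PySem.Chars.splitOn.go [c] fuel rest (a :: cur) acc := rfl
      rw [hstep]
      have hlen : rest.length < fuel := by simpa using Nat.lt_of_succ_lt_succ (by simpa using h)
      by_cases hac : a = c
      · have hp : [c].isPrefixOf (a :: rest) = true := by simp [List.isPrefixOf, hac]
        rw [if_pos hp, ih _ _ _ (by simpa using hlen)]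
        simp [pvSegs, hac]
      · have hp : [c].isPrefixOf (a :: rest) = false := by
          simp [List.isPrefixOf]; exact fun hh => absurd hh.symm hac
        rw [if_neg (by simp [hp]), ih _ _ _ hlen]
        simp [pvSegs, hac]

theorem pvSplitOn_eq (c : Char) (l : List Char) :
    PySem.Chars.splitOn l [c] = pvSegs c [] l := by
  show PySem.Chars.splitOn.go [c] (l.length + 1) l [] [] = _
  rw [pvSplitOnGo c (l.length + 1) l [] [] (by omega)]
  rfl

theorem pvFindGo (c : Char) :
    ∀ (l : List Char) (k : Nat),
    PySem.Chars.find.go [c] l k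
      = if c ∈ l then ((k : Int) + (l.takeWhile (· ≠ c)).length) else -1 := by
  intro l
  induction l with
  | nil => intro k; rw [PySem.Chars.find.go.eq_def]; simp
  | cons a rest ih =>
    intro k
    have hstep : PySem.Chars.find.go [c] (a :: rest) k =
        if [c].isPrefixOf (a :: rest) = true then (k : Int)
        else PySem.Chars.find.go [c] rest (k + 1) := rfl
    rw [hstep]
    by_cases hac : a = c
    · have hp : [c].isPrefixOf (a :: rest) = true := by simp [List.isPrefixOf, hac]
      simp [hac]
    · have hp : [c].isPrefixOf (a :: rest) = false := by
        simp [List.isPrefixOf]; exact fun hh => absurd hh.symm hac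
      simp only [hp, Bool.false_eq_true, if_false, ih]
      by_cases hm : c ∈ rest
      · simp [hm, hac]
        omega
      · have hna : c ∉ a :: rest := by
          simp only [List.mem_cons]
          rintro (hh | hh)
          · exact hac hh.symm
          · exact hm hh
        simp [hna, hm]

theorem pvFind_eq (c : Char) (l : List Char) :
    PySem.Chars.find l [c] = if c ∈ l then (((l.takeWhile (· ≠ c)).length : Int)) else -1 := by
  show PySem.Chars.find.go [c] l 0 = _
  rw [pvFindGo]
  by_cases hm : c ∈ l <;> simp [hm]

theorem pvSegs_no (c : Char) (pre l : List Char) (h : c ∉ l) :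
    pvSegs c pre l = [pre ++ l] := by
  induction l generalizing pre with
  | nil => simp [pvSegs]
  | cons a rest ih =>
    have hac : ¬ a = c := fun hh => h (by simp [hh])
    simp only [pvSegs, if_neg hac]
    rw [ih _ (fun hh => h (by simp [hh]))]
    simp

theorem pvSegs_yes (c : Char) (pre l : List Char) (h : c ∈ l) :
    pvSegs c pre l
      = (pre ++ l.takeWhile (· ≠ c)) :: pvSegs c [] (l.drop ((l.takeWhile (· ≠ c)).length + 1)) := by
  induction l generalizing pre with
  | nil => cases h
  | cons a rest ih =>
    by_cases hac : a = c
    · simp [pvSegs, hac]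
    · have hm : c ∈ rest := by
        rcases List.mem_cons.mp h with h | h
        · exact absurd h.symm hac
        · exact h
      simp only [pvSegs, if_neg hac]
      rw [ih _ hm]
      simp [hac]

theorem pvTake_takeWhile (p : Char → Bool) (l : List Char) :
    l.take (l.takeWhile p).length = l.takeWhile p := by
  exact ((List.prefix_iff_eq_take.mp (List.takeWhile_prefix p))).symm

theorem pvSplitOnMaxGo0 (sep : List Char) (fuel : Nat) (l cur : List Char)
    (acc : List (List Char)) :
    PySem.Chars.splitOnMax.go sep fuel 0 l cur acc = ((cur.reverse ++ l) :: acc).reverse := by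
  rw [PySem.Chars.splitOnMax.go.eq_def]
  match fuel, l with
  | 0, _ => rfl
  | fuel + 1, [] => simp
  | fuel + 1, a :: rest => simp

theorem pvSplitOnMaxGo1 (c : Char) :
    ∀ (fuel : Nat) (l cur : List Char) (acc : List (List Char)), l.length < fuel →
    PySem.Chars.splitOnMax.go [c] fuel 1 l cur acc
      = acc.reverse ++ (if c ∈ l
          then [cur.reverse ++ l.takeWhile (· ≠ c), l.drop ((l.takeWhile (· ≠ c)).length + 1)]
          else [cur.reverse ++ l]) := by
  intro fuel
  induction fuel with
  | zero => intro l cur acc h; omega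
  | succ fuel ih =>
    intro l cur acc h
    match l with
    | [] => rw [PySem.Chars.splitOnMax.go.eq_def]; simp
    | a :: rest =>
      have hstep : PySem.Chars.splitOnMax.go [c] (fuel + 1) 1 (a :: rest) cur acc =
          if (1 : Nat) = 0 then ((cur.reverse ++ (a :: rest)) :: acc).reverse
          else if [c].isPrefixOf (a :: rest) = true then
            PySem.Chars.splitOnMax.go [c] fuel 0 (List.drop [c].length (a :: rest)) [] (cur.reverse :: acc)
          else PySem.Chars.splitOnMax.go [c] fuel 1 rest (a :: cur) acc := rfl
      rw [hstep, if_neg (by omega : ¬ (1 : Nat) = 0)]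
      have hlen : rest.length < fuel := by simpa using Nat.lt_of_succ_lt_succ (by simpa using h)
      by_cases hac : a = c
      · have hp : [c].isPrefixOf (a :: rest) = true := by simp [List.isPrefixOf, hac]
        rw [if_pos hp, pvSplitOnMaxGo0]
        simp [hac]
      · have hp : [c].isPrefixOf (a :: rest) = false := by
          simp [List.isPrefixOf]; exact fun hh => absurd hh.symm hac
        rw [if_neg (by simp [hp]), ih _ _ _ hlen]
        by_cases hm : c ∈ rest
        · simp [hm, hac]
        · have hna : c ∉ a :: rest := by
            simp only [List.mem_cons]
            rintro (hh | hh)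
            · exact hac hh.symm
            · exact hm hh
          simp [hna, hm]

theorem pvSplitOnMax1 (c : Char) (l : List Char) (h : c ∈ l) :
    PySem.Chars.splitOnMax l [c] 1
      = [l.takeWhile (· ≠ c), l.drop ((l.takeWhile (· ≠ c)).length + 1)] := by
  show (if (1 : Int) < 0 then _ else PySem.Chars.splitOnMax.go [c] (l.length + 1) (1 : Int).toNat l [] []) = _
  rw [if_neg (by omega)]
  rw [show (1 : Int).toNat = 1 from rfl, pvSplitOnMaxGo1 c (l.length + 1) l [] [] (by omega)]
  simp [h]

theorem pvMemDropWhile (p : Char → Bool) (l : List Char) {a : Char}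
    (h : a ∈ l) (hp : p a = false) : a ∈ l.dropWhile p := by
  induction l with
  | nil => cases h
  | cons b t ih =>
    rw [List.dropWhile_cons]
    by_cases hb : p b = true
    · rw [if_pos hb]
      apply ih
      rcases List.mem_cons.mp h with h | h
      · rw [h] at hp; rw [hp] at hb; cases hb
      · exact h
    · rw [if_neg hb]; exact h

-- '=' survives strip (it is not whitespace)
theorem pvMemStrip (l : List Char) (h : '=' ∈ l) : '=' ∈ PySem.Chars.strip l := by
  have hsp : PySem.Chars.isspace '=' = false := by decide
  unfold PySem.Chars.strip PySem.Chars.rstrip PySem.Chars.lstrip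
  have h1 := pvMemDropWhile PySem.Chars.isspace l h hsp
  have h2 : '=' ∈ (List.dropWhile PySem.Chars.isspace l).reverse := by simpa using h1
  have h3 := pvMemDropWhile PySem.Chars.isspace _ h2 hsp
  simpa using h3

-- a ';'-containing list has a strictly shorter (·≠';')-prefix
theorem pvTakeWhileLt (c : Char) (l : List Char) (h : c ∈ l) :
    (l.takeWhile (· ≠ c)).length < l.length := by
  induction l with
  | nil => cases h
  | cons a t ih =>
    by_cases hac : a = c
    · simp [hac]
    · rcases List.mem_cons.mp h with hh | hh
      · exact absurd hh.symm hac
      · simpa [hac] using ih hh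

theorem pvDropLast1 (a : Char) (t : List Char) :
    (a :: t).drop ((a :: t).length - 1) = [(a :: t).getLastD ' '] := by
  induction t generalizing a with
  | nil => rfl
  | cons b t ih => simpa using ih b

theorem pvBeq_ofList (x y : List Char) : (String.ofList x == String.ofList y) = (x == y) := by
  by_cases h : x = y
  · simp [h]
  · have hne : String.ofList x ≠ String.ofList y := fun hh => h (by
      simpa using congrArg String.toList hh)
    simp [h, hne]

-- ---- the quote fix agrees on the two sides ----

theorem pvQuoted_eq (v : List Char) : pvIsQuotedA (String.ofList v) = pvIsQuotedB v := by
  cases v with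
  | nil => decide
  | cons a t =>
    unfold pvIsQuotedA pvIsQuotedB PySem.Str.slice
    simp only [String.toList_ofList, PySem.Chars.slice_eq_listSlice]
    have h1 : PySem.List.slice (a :: t) none (some 1) = [a] := by
      rw [PySem.List.slice_to (a :: t) (by omega)]
      simp
    have h2 : PySem.List.slice (a :: t) (some (-1)) none = [(a :: t).getLastD ' '] := by
      have hc : PySem.List.clampIdx (a :: t).length (-1) = t.length := by
        simp [PySem.List.clampIdx]
      show List.take ((a :: t).length - PySem.List.clampIdx (a :: t).length (-1))
            (List.drop (PySem.List.clampIdx (a :: t).length (-1)) (a :: t)) = _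
      rw [hc]
      have hd : List.drop t.length (a :: t) = (a :: t).drop ((a :: t).length - 1) := by simp
      rw [hd, pvDropLast1]
      have h1 : (a :: t).length - t.length = 1 := by simp
      rw [h1]
      rfl
    rw [h1, h2]
    rw [show ("\"" : String) = String.ofList ['"'] from rfl]
    rw [show ([a] : List Char) = List.cons a [] from rfl]
    rw [pvBeq_ofList, pvBeq_ofList]
    set g := (a :: t).getLastD ' ' with hgdef
    by_cases hg : g = '"'
    · rw [hg]
      simp
    · have hgb : (g == '"') = false := by simpa using hg
      simp [hgb]

theorem pvFix_eq (v : List Char) :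
    pvFix (String.ofList v)
      = String.ofList (if pvIsQuotedB v then PySem.Chars.slice v (some 1) (some (-1)) else v) := by
  unfold pvFix pvUnquoteA
  rw [pvQuoted_eq]
  by_cases h : pvIsQuotedB v = true
  · rw [if_pos h, if_pos h]
    unfold PySem.Str.slice
    rw [String.toList_ofList]
  · rw [if_neg h, if_neg h]

-- ---- B's scanner is the fused fold over the split pieces ----

-- B's per-segment action (the loop body on one raw segment)
def pvStepScan (d : PySem.Dict String String) (seg0 : List Char) : PySem.Dict String String :=
  let seg := PySem.Chars.strip seg0
  let kv := pvPartitionEq seg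
  let v := if pvIsQuotedB kv.2 then PySem.Chars.slice kv.2 (some 1) (some (-1)) else kv.2
  d.insert (String.ofList kv.1) (String.ofList v)

theorem pvScan_eq (cs : List Char) :
    ∀ (fuel i : Nat) (d : PySem.Dict String String),
    cs.length + 2 - i ≤ fuel → i ≤ cs.length + 1 →
    pvScanB cs fuel i d
      = if i ≤ cs.length then (pvSegs ';' [] (cs.drop i)).foldl pvStepScan d else d := by
  intro fuel
  induction fuel with
  | zero => intro i d h1 h2; omega
  | succ fuel ih =>
    intro i d h1 h2
    have hstep : pvScanB cs (fuel + 1) i d =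
        if i ≤ cs.length then
          pvScanB cs fuel
            ((if PySem.Chars.findFrom cs [';'] (i : Int) none < 0 then cs.length
              else (PySem.Chars.findFrom cs [';'] (i : Int) none).toNat) + 1)
            (pvStepScan d (PySem.Chars.slice cs (some (i : Int))
              (some (((if PySem.Chars.findFrom cs [';'] (i : Int) none < 0 then cs.length
                else (PySem.Chars.findFrom cs [';'] (i : Int) none).toNat) : Nat) : Int))))
        else d := rfl
    rw [hstep]
    by_cases hi : i ≤ cs.length
    · rw [if_pos hi, if_pos hi]
      have hff := PySem.Chars.findFrom_natCast cs [';'] i hi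
      by_cases hmem : ';' ∈ cs.drop i
      · have hfe := pvFind_eq ';' (cs.drop i)
        rw [if_pos hmem] at hfe
        set L := ((cs.drop i).takeWhile (· ≠ ';')).length with hL
        have hLlt : L < cs.length - i := by
          have := pvTakeWhileLt ';' (cs.drop i) hmem
          simpa [hL] using this
        have hffv : PySem.Chars.findFrom cs [';'] (i : Int) none = (i : Int) + L := by
          rw [hff, hfe]
          rw [if_neg (by omega)]
        rw [hffv]
        rw [if_neg (by omega : ¬ ((i : Int) + (L : Int) < 0))]
        have htn : (((i : Int) + L)).toNat = i + L := by omega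
        rw [htn]
        have hseg : PySem.Chars.slice cs (some (i : Int)) (some ((((i + L) : Nat) : Int)))
            = (cs.drop i).takeWhile (· ≠ ';') := by
          rw [show PySem.Chars.slice cs (some (i : Int)) (some (((i + L : Nat)) : Int))
              = PySem.List.slice cs (some ((i : Nat) : Int)) (some (((i + L : Nat)) : Int)) from by
            simp]
          rw [PySem.List.slice_natCast]
          rw [show i + L - i = L from by omega]
          rw [hL, pvTake_takeWhile]
        rw [hseg]
        rw [ih (i + L + 1) _ (by omega) (by omega)]
        rw [if_pos (by omega : i + L + 1 ≤ cs.length)]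
        rw [pvSegs_yes ';' [] (cs.drop i) hmem]
        rw [List.foldl_cons]
        have hdd : (cs.drop i).drop (((cs.drop i).takeWhile (· ≠ ';')).length + 1)
            = cs.drop (i + L + 1) := by
          rw [List.drop_drop, ← hL]
          have hadd : i + (L + 1) = i + L + 1 := by omega
          rw [hadd]
        rw [hdd]
        rfl
      · have hfe := pvFind_eq ';' (cs.drop i)
        rw [if_neg hmem] at hfe
        have hffv : PySem.Chars.findFrom cs [';'] (i : Int) none = -1 := by
          rw [hff, hfe]
          simp
        rw [hffv]
        rw [if_pos (by omega : (-1 : Int) < 0)]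
        have hseg : PySem.Chars.slice cs (some (i : Int)) (some (((cs.length : Nat)) : Int))
            = cs.drop i := by
          rw [show PySem.Chars.slice cs (some (i : Int)) (some (((cs.length : Nat)) : Int))
              = PySem.List.slice cs (some ((i : Nat) : Int)) (some (((cs.length : Nat)) : Int)) from by
            simp]
          rw [PySem.List.slice_natCast]
          apply List.take_of_length_le
          simp
        rw [hseg]
        rw [ih (cs.length + 1) _ (by omega) (by omega)]
        rw [if_neg (by omega)]
        rw [pvSegs_no ';' [] (cs.drop i) hmem]
        simp
    · rw [if_neg hi, if_neg hi]

-- fused step = scan step on a segment containing '='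
theorem pvPartition_mem (s' : List Char) (hm : '=' ∈ s') :
    pvPartitionEq s' = (s'.takeWhile (· ≠ '='), s'.drop ((s'.takeWhile (· ≠ '=')).length + 1)) := by
  show (if PySem.Chars.find s' ['='] < 0 then (s', [])
        else (s'.take (PySem.Chars.find s' ['=']).toNat,
              s'.drop ((PySem.Chars.find s' ['=']).toNat + 1))) = _
  rw [pvFind_eq, if_pos hm]
  rw [if_neg (by omega : ¬ (((s'.takeWhile (· ≠ '=')).length : Int) < 0))]
  have ht : (((s'.takeWhile (· ≠ '=')).length : Int)).toNat = (s'.takeWhile (· ≠ '=')).length := by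
    omega
  rw [ht, pvTake_takeWhile]

-- fused step = scan step on a segment containing '='
theorem pvStep_eq (d : PySem.Dict String String) (s : List Char) (h : '=' ∈ s) :
    pvStepFused d (String.ofList s) = pvStepScan d s := by
  have hm : '=' ∈ PySem.Chars.strip s := pvMemStrip s h
  have hstrip : PySem.Str.strip (String.ofList s) = String.ofList (PySem.Chars.strip s) := by
    unfold PySem.Str.strip
    rw [String.toList_ofList]
  have hsplit : PySem.Str.splitMax? (String.ofList (PySem.Chars.strip s)) "=" 1
      = some [String.ofList ((PySem.Chars.strip s).takeWhile (· ≠ '=')),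
              String.ofList ((PySem.Chars.strip s).drop
                (((PySem.Chars.strip s).takeWhile (· ≠ '=')).length + 1))] := by
    unfold PySem.Str.splitMax? PySem.Chars.splitMax?
    simp only [String.toList_ofList]
    rw [if_neg (by decide : ¬ (((("=" : String).toList) : List Char).isEmpty = true))]
    rw [show (("=" : String).toList : List Char) = ['='] from rfl]
    rw [pvSplitOnMax1 '=' _ hm]
    rfl
  have hscan : pvStepScan d s
      = d.insert (String.ofList (pvPartitionEq (PySem.Chars.strip s)).1)
          (String.ofList (if pvIsQuotedB (pvPartitionEq (PySem.Chars.strip s)).2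
            then PySem.Chars.slice (pvPartitionEq (PySem.Chars.strip s)).2 (some 1) (some (-1))
            else (pvPartitionEq (PySem.Chars.strip s)).2)) := rfl
  rw [hscan, pvPartition_mem _ hm]
  unfold pvStepFused
  rw [hstrip, hsplit]
  show d.insert (String.ofList ((PySem.Chars.strip s).takeWhile (· ≠ '=')))
        (pvFix (String.ofList ((PySem.Chars.strip s).drop
          (((PySem.Chars.strip s).takeWhile (· ≠ '=')).length + 1)))) = _
  rw [pvFix_eq]

-- ===== VERDICT (by name: the statement is the Claim_ definition above) =====
theorem parse_hdr_spec : Claim_equal_parse_hdr := by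
  intro hdr _ hpre
  unfold Spec_parse_hdr
  have hsplit : PySem.Str.split? hdr ";" = some ((pvSegs ';' [] hdr.toList).map String.ofList) := by
    unfold PySem.Str.split? PySem.Chars.split?
    rw [if_neg (by decide : ¬ ((((";" : String).toList) : List Char).isEmpty = true))]
    rw [show (((";" : String).toList) : List Char) = [';'] from rfl]
    rw [pvSplitOn_eq]
    rfl
  by_cases hmem : ';' ∈ hdr.toList
  · have hIn : PySem.Str.isIn ";" hdr = true := by
      rw [PySem.Str.isIn_iff_infix]
      exact (List.singleton_infix_iff ';' hdr.toList).mpr hmem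
    have hfind := pvFind_eq ';' hdr.toList
    rw [if_pos hmem] at hfind
    set L0 := (hdr.toList.takeWhile (· ≠ ';')).length with hL0
    have hL0lt : L0 < hdr.toList.length := pvTakeWhileLt ';' hdr.toList hmem
    have hA : parse_hdr hdr
        = (String.ofList (hdr.toList.takeWhile (· ≠ ';')),
           ((pvSegs ';' [] (hdr.toList.drop (L0 + 1))).foldl pvStepScan PySem.Dict.empty).items) := by
      unfold parse_hdr
      rw [if_pos hIn, hsplit]
      rw [pvSegs_yes ';' [] hdr.toList hmem]
      simp only [List.nil_append, Option.getD_some, List.map_cons, List.headD_cons,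
        List.tail_cons, ← hL0]
      have hcong : ∀ (acc : PySem.Dict String String) (x : List Char),
          x ∈ pvSegs ';' [] (hdr.toList.drop (L0 + 1)) →
          pvStepFused acc (String.ofList x) = pvStepScan acc x := by
        intro acc x hx
        apply pvStep_eq
        have hxs : String.ofList x ∈ ((PySem.Str.split? hdr ";").getD []).tail := by
          rw [hsplit, pvSegs_yes ';' [] hdr.toList hmem]
          simp only [Option.getD_some, List.map_cons, List.tail_cons]
          rw [← hL0]
          exact List.mem_map_of_mem hx
        have hp := hpre hIn (String.ofList x) hxs
        rw [PySem.Str.isIn_iff_infix] at hp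
        exact (List.singleton_infix_iff '=' x).mp (by simpa using hp)
      rw [pvDict_eq, List.foldl_map]
      rw [PySem.List.foldl_congr_mem _ _ pvStepScan _ hcong]
    have hB : parse_hdr_alt hdr
        = (String.ofList (hdr.toList.takeWhile (· ≠ ';')),
           ((pvSegs ';' [] (hdr.toList.drop (L0 + 1))).foldl pvStepScan PySem.Dict.empty).items) := by
      show (if PySem.Chars.find hdr.toList [';'] < 0 then (hdr, [])
            else (String.ofList (PySem.Chars.slice hdr.toList none
                    (some (PySem.Chars.find hdr.toList [';']))),
                  (pvScanB hdr.toList (hdr.toList.length + 2)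
                    ((PySem.Chars.find hdr.toList [';']).toNat + 1) PySem.Dict.empty).items)) = _
      rw [hfind]
      rw [if_neg (by omega : ¬ ((L0 : Int) < 0))]
      have htn : ((L0 : Int)).toNat = L0 := by omega
      rw [htn]
      have hhead : PySem.Chars.slice hdr.toList none (some ((L0 : Nat) : Int))
          = hdr.toList.takeWhile (· ≠ ';') := by
        rw [show PySem.Chars.slice hdr.toList none (some ((L0 : Nat) : Int))
            = PySem.List.slice hdr.toList none (some ((L0 : Nat) : Int)) from by simp]
        rw [PySem.List.slice_to hdr.toList (by omega)]
        rw [show (((L0 : Nat) : Int)).toNat = L0 from by omega]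
        rw [hL0, pvTake_takeWhile]
      rw [hhead]
      rw [pvScan_eq hdr.toList (hdr.toList.length + 2) (L0 + 1) PySem.Dict.empty
        (by omega) (by omega)]
      rw [if_pos (by omega : L0 + 1 ≤ hdr.toList.length)]
    rw [hA, hB]
  · have hIn : PySem.Str.isIn ";" hdr = false := by
      cases hv : PySem.Str.isIn ";" hdr
      · rfl
      · exact absurd ((List.singleton_infix_iff ';' hdr.toList).mp (by
          have hinf := (PySem.Str.isIn_iff_infix ";" hdr).mp hv
          simpa using hinf)) hmem
    have hfind := pvFind_eq ';' hdr.toList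
    rw [if_neg hmem] at hfind
    unfold parse_hdr
    rw [if_neg (by rw [hIn]; simp)]
    show (hdr, ([] : List (String × String)))
        = (if PySem.Chars.find hdr.toList [';'] < 0 then (hdr, [])
           else (String.ofList (PySem.Chars.slice hdr.toList none
                  (some (PySem.Chars.find hdr.toList [';']))),
                 (pvScanB hdr.toList (hdr.toList.length + 2)
                   ((PySem.Chars.find hdr.toList [';']).toNat + 1) PySem.Dict.empty).items))
    rw [hfind, if_pos (by omega : (-1 : Int) < 0)]
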